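-- pv_equiv track=rewrite | github.com/allknownlawsofaviation/Thesis-Code | recompile_data.py | extract_vuln_type
-- ===== SOURCE A (Python) =====
-- def extract_vuln_type(summary, wordlist):
--     try:
--         Summary = summary
--         summary = summary.lower()  # Normalize casing
--         matched = []
--         for word in wordlist:
--             if word.lower() in summary:
--                 matched.append(word)
--         return matched if matched else ["unknown"]
--     except AttributeError:
--         return ["none"]
-- ===== SOURCE B (Python) =====
-- def extract_vuln_type(summary, wordlist):
--     # Index all substrings of the lowered summary whose length is some word length,
--     # then each word is matched by one O(1) set lookup instead of a scan of summary.
--     s = summary.lower()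
--     n = len(s)
--     subs = set()
--     for L in set(len(w) for w in wordlist):
--         for i in range(n - L + 1):
--             subs.add(s[i:i + L])
--     matched = [w for w in wordlist if w.lower() in subs]
--     return matched if matched else ["unknown"]
-- ===== Notes on version B (the rewrite author's own statement) =====
-- stated objective: faster
-- what changed: Instead of scanning the summary once per word with 'in', B builds a hash set of all substrings of the lowered summary whose length is one of the distinct word lengths, then matches each word by a single set lookup.
import Mathlib
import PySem

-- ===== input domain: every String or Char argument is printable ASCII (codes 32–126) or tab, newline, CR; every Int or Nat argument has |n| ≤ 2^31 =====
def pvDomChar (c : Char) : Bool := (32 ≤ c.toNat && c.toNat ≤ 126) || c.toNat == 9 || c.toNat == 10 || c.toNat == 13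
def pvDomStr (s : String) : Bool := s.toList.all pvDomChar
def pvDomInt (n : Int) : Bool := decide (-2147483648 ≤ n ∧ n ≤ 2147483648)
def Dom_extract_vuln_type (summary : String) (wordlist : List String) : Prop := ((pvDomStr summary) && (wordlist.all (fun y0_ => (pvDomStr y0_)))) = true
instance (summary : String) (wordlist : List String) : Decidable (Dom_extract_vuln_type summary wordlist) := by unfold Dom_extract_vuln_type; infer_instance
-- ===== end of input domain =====

-- B replaces the per-word scan of summary by a set of all summary substrings of the occurring
-- word lengths, then one membership test per word (alternative algorithm, same return value).

-- ===== PORT A =====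
-- try/except AttributeError: summary is a String here, so .lower() never raises; the except arm
-- (and the dead binding 'Summary = summary') cannot be reached and is omitted.
def extract_vuln_type (summary : String) (wordlist : List String) : List String :=
  let summaryL := PySem.Str.lower summary
  let matched := wordlist.foldl (fun acc word =>
    if PySem.Str.isIn (PySem.Str.lower word) summaryL then acc ++ [word] else acc) []
  if matched.isEmpty then ["unknown"] else matched

-- ===== PORT B =====
-- 'for L in set(...)' iterates a Python set; subs (a set) and matched depend only on the
-- members of that set, not on the iteration order, so folding in ofList order is exact.
def extract_vuln_type_alt (summary : String) (wordlist : List String) : List String :=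
  let s := PySem.Str.lower summary
  let n : Int := PySem.Str.len s
  let lens : PySem.Set Int := PySem.Set.ofList (wordlist.map (fun w => PySem.Str.len w))
  let subs : PySem.Set String :=
    lens.foldl (fun acc L =>
      (PySem.List.pyRange 0 (n - L + 1) 1).foldl
        (fun acc2 i => PySem.Set.add acc2 (PySem.Str.slice s (some i) (some (i + L)))) acc)
      PySem.Set.empty
  let matched := wordlist.filter (fun w => PySem.Set.contains subs (PySem.Str.lower w))
  if matched.isEmpty then ["unknown"] else matched

-- ===== PRECONDITION & SPEC =====
def Spec_extract_vuln_type (summary : String) (wordlist : List String) (out : List String) : Prop := out = extract_vuln_type_alt summary wordlist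
instance (summary : String) (wordlist : List String) (out : List String) : Decidable (Spec_extract_vuln_type summary wordlist out) := by unfold Spec_extract_vuln_type; infer_instance

-- ===== CLAIM (what is proved, stated in full; the proofs are below) =====
def Claim_equal_extract_vuln_type : Prop := ∀ (summary : String) (wordlist : List String), Dom_extract_vuln_type summary wordlist → Spec_extract_vuln_type summary wordlist (extract_vuln_type summary wordlist)

-- ===== LEMMAS AND PROOFS =====

theorem pv_length_lower (l : List Char) : (PySem.Chars.lower l).length = l.length := by
  simp [PySem.Chars.lower]

-- membership in the substring set built by B's nested fold
theorem pv_mem_subs_fold (s : String) (n : Int) (ls : List Int) (acc : PySem.Set String) (y : String) :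
    y ∈ ls.foldl (fun acc L =>
      (PySem.List.pyRange 0 (n - L + 1) 1).foldl
        (fun acc2 i => PySem.Set.add acc2 (PySem.Str.slice s (some i) (some (i + L)))) acc) acc
    ↔ y ∈ acc ∨ ∃ L ∈ ls, ∃ i ∈ PySem.List.pyRange 0 (n - L + 1) 1,
        y = PySem.Str.slice s (some i) (some (i + L)) := by
  induction ls generalizing acc with
  | nil => simp
  | cons L ls ih =>
    simp only [List.foldl_cons, ih, PySem.Set.mem_foldl_add, List.mem_cons]
    constructor
    · rintro (⟨h | ⟨i, hi, hy⟩⟩ | ⟨L', hL', i, hi, hy⟩)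
      · exact Or.inl h
      · exact Or.inr ⟨L, Or.inl rfl, i, hi, hy⟩
      · exact Or.inr ⟨L', Or.inr hL', i, hi, hy⟩
    · rintro (h | ⟨L', hL' | hL', i, hi, hy⟩)
      · exact Or.inl (Or.inl h)
      · subst hL'; exact Or.inl (Or.inr ⟨i, hi, hy⟩)
      · exact Or.inr ⟨L', hL', i, hi, hy⟩

-- A's match test equals B's set lookup, for any word of the list
theorem pv_pred_eq (summary : String) (wordlist : List String) (w : String) (hw : w ∈ wordlist) :
    PySem.Str.isIn (PySem.Str.lower w) (PySem.Str.lower summary) =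
      PySem.Set.contains
        (List.foldl (fun acc L =>
            List.foldl
              (fun acc2 i => PySem.Set.add acc2
                (PySem.Str.slice (PySem.Str.lower summary) (some i) (some (i + L)))) acc
              (PySem.List.pyRange 0 (PySem.Str.len (PySem.Str.lower summary) - L + 1) 1))
          PySem.Set.empty
          (PySem.Set.ofList (wordlist.map (fun w => PySem.Str.len w))))
        (PySem.Str.lower w) := by
  set s := PySem.Str.lower summary with hs
  set t := PySem.Str.lower w with htdef
  have hlen_t : t.toList.length = w.toList.length := by
    rw [htdef, PySem.Str.toList_lower, pv_length_lower]
  rw [Bool.eq_iff_iff, PySem.Set.contains_iff, pv_mem_subs_fold, PySem.Str.isIn_eq,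
    PySem.Chars.isIn_iff_infix]
  simp only [PySem.Set.mem_ofList, show (t ∈ (PySem.Set.empty : PySem.Set String)) ↔ False by
    simp [PySem.Set.empty], false_or]
  constructor
  · intro hinf
    have hf0 : 0 ≤ PySem.Chars.find s.toList t.toList :=
      (PySem.Chars.find_nonneg_iff _ _).mpr hinf
    obtain ⟨hpre, -⟩ := PySem.Chars.find_spec hf0
    have hfle : PySem.Chars.find s.toList t.toList ≤ (s.toList.length : Int) :=
      PySem.Chars.find_le_length _ _
    set j := (PySem.Chars.find s.toList t.toList).toNat with hj
    have hjle : j ≤ s.toList.length := by omega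
    have hlen : t.toList.length ≤ s.toList.length - j := by
      have := hpre.length_le
      simpa using this
    refine ⟨PySem.Str.len w, List.mem_map.mpr ⟨w, hw, rfl⟩, (j : Int), ?_, ?_⟩
    · rw [PySem.List.mem_pyRange_one]
      simp only [PySem.Str.len_eq]
      constructor
      · positivity
      · omega
    · rw [← String.toList_inj, PySem.Str.toList_slice, PySem.Chars.slice_eq_listSlice,
        PySem.Str.len_eq, PySem.List.slice_natCast_add]
      rw [List.prefix_iff_eq_take.mp hpre, hlen_t]
  · rintro ⟨L, hL, i, hi, ht⟩
    have h0i : 0 ≤ i := (PySem.List.mem_pyRange_one.mp hi).1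
    have h0L : 0 ≤ L := by
      obtain ⟨w', -, rfl⟩ := List.mem_map.mp hL
      simp [PySem.Str.len_eq]
    rw [← PySem.Chars.isIn_iff_infix]
    apply (PySem.Chars.exists_prefix_drop_iff_isIn _ _).mp
    refine ⟨i.toNat, ?_⟩
    have htl : t.toList = List.take ((i + L).toNat - i.toNat) (List.drop i.toNat s.toList) := by
      rw [ht, PySem.Str.toList_slice, PySem.Chars.slice_eq_listSlice,
        PySem.List.slice_toNat _ h0i (by omega)]
    rw [htl]
    exact List.take_prefix _ _

theorem extract_vuln_type_spec : Claim_equal_extract_vuln_type := by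
  intro summary wordlist _
  unfold Spec_extract_vuln_type
  simp only [extract_vuln_type, extract_vuln_type_alt]
  rw [PySem.List.foldl_append_if_eq_filter, List.nil_append,
    List.filter_congr (fun w hw => pv_pred_eq summary wordlist w hw)]
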